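-- pv_equiv track=rewrite | github.com/epoch8/rasa-for-botfront | rasa/core/channels/vk.py | form_keyboard_buttons
-- ===== SOURCE A (Python) =====
-- from typing import Dict, Text, Any, List, Optional, Callable, Awaitable
--
-- def form_keyboard_buttons(buttons: List[Dict[Text, Any]]):
--     def _chunkIt(seq, num):
--         out = []
--         last = 0
--         while last < len(seq):
--             out.append(seq[last:(last + num)])
--             last += num
--         return out
--     data = _chunkIt(buttons, 3)
--     result = []
--     for row in data:
--         for i, piece in enumerate(row):
--             row[i] = {
--                 "action": {
--                     "type": "text",
--                     "payload": piece["payload"],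
--                     "label": piece["title"]
--                 }
--             }
--         result.append(row)
--     return result
-- ===== SOURCE B (Python) =====
-- def form_keyboard_buttons(buttons):
--     # Single pass: accumulate the current row online instead of chunking first.
--     result = []
--     current = []
--     for b in buttons:
--         current.append({
--             "action": {
--                 "type": "text",
--                 "payload": b["payload"],
--                 "label": b["title"],
--             }
--         })
--         if len(current) == 3:
--             result.append(current)
--             current = []
--     if current:
--         result.append(current)
--     return result
-- ===== Notes on version B (the rewrite author's own statement) =====
-- stated objective: simpler
-- what changed: Replaces A's chunk-then-mutate two-pass shape (slice the list into rows of 3, then rewrite each row's entries in place) with one online pass that builds each transformed row as it goes and flushes it every 3 buttons.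
import Mathlib
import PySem

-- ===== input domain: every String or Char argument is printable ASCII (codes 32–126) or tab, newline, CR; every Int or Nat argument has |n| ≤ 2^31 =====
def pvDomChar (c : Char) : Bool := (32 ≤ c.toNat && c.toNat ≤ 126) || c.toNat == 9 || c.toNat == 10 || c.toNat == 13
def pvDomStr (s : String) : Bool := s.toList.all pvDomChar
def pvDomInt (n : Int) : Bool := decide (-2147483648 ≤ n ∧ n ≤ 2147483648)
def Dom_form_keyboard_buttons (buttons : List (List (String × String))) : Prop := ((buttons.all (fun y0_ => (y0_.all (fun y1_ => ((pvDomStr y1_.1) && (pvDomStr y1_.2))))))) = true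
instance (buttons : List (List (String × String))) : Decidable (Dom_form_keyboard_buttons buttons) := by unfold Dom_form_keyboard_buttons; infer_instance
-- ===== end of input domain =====

-- B replaces A's chunk-then-mutate two-pass shape with a single online pass that flushes a row every 3 buttons (objective: simpler).
-- ===== PORT A =====
-- A-side: button entry built from a dict lookup (piece["payload"], piece["title"]);
-- getD "" is exact under Pre_ (both keys present, so get? is some).
def pvBtnA (piece : List (String × String)) : List (String × List (String × String)) :=
  [("action",
     [("type", "text"),
      ("payload", ((PySem.Dict.mk piece).get? "payload").getD ""),
      ("label", ((PySem.Dict.mk piece).get? "title").getD "")])]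

-- _chunkIt's while loop: out.append(seq[last:last+num]); last += num
def pvChunkIt (seq : List (List (String × String))) (last : Nat) :
    List (List (List (String × String))) :=
  if h : last < seq.length then
    PySem.List.slice seq (some (last : Int)) (some ((last : Int) + 3))
      :: pvChunkIt seq (last + 3)
  else []
termination_by seq.length - last
decreasing_by omega

def form_keyboard_buttons (buttons : List (List (String × String))) : List (List (List (String × List (String × String)))) :=
  let data := pvChunkIt buttons 0
  -- for row in data: for i, piece in enumerate(row): row[i] = {...}; result.append(row)
  data.foldl (fun result row => result ++ [row.map pvBtnA]) []

-- ===== PORT B =====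
-- B-side copy of the transformed button entry
def pvBtnB (b : List (String × String)) : List (String × List (String × String)) :=
  [("action",
     [("type", "text"),
      ("payload", ((PySem.Dict.mk b).get? "payload").getD ""),
      ("label", ((PySem.Dict.mk b).get? "title").getD "")])]

def form_keyboard_buttons_alt (buttons : List (List (String × String))) : List (List (List (String × List (String × String)))) :=
  let st := buttons.foldl
    (fun (st : List (List (List (String × List (String × String)))) ×
               List (List (String × List (String × String)))) b =>
      let current := st.2 ++ [pvBtnB b]
      if current.length == 3 then (st.1 ++ [current], []) else (st.1, current))
    ([], [])
  if st.2.isEmpty then st.1 else st.1 ++ [st.2]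

-- ===== PRECONDITION & SPEC =====
-- Pre_ excludes buttons missing a "payload" or "title" key, on which A raises KeyError.
def Pre_form_keyboard_buttons (buttons : List (List (String × String))) : Prop :=
  ∀ piece ∈ buttons, ((PySem.Dict.mk piece).get? "payload").isSome ∧ ((PySem.Dict.mk piece).get? "title").isSome
instance (buttons : List (List (String × String))) : Decidable (Pre_form_keyboard_buttons buttons) := by unfold Pre_form_keyboard_buttons; infer_instance
def pvWitness_form_keyboard_buttons : (List (List (String × String))) :=
  [[("payload", "p1"), ("title", "t1")], [("payload", "p2"), ("title", "t2")],
   [("payload", "p3"), ("title", "t3")], [("payload", "p4"), ("title", "t4")]]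

def Spec_form_keyboard_buttons (buttons : List (List (String × String))) (out : List (List (List (String × List (String × String))))) : Prop := out = form_keyboard_buttons_alt buttons
instance (buttons : List (List (String × String))) (out : List (List (List (String × List (String × String))))) : Decidable (Spec_form_keyboard_buttons buttons out) := by unfold Spec_form_keyboard_buttons; infer_instance

-- ===== CLAIM (what is proved, stated in full; the proofs are below) =====
def Claim_equal_form_keyboard_buttons : Prop := ∀ (buttons : List (List (String × String))), Dom_form_keyboard_buttons buttons → Pre_form_keyboard_buttons buttons → Spec_form_keyboard_buttons buttons (form_keyboard_buttons buttons)

-- ===== LEMMAS AND PROOFS =====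

-- reference chunking: rows of 3, front to back
def pvChunks3 {α : Type} (l : List α) : List (List α) :=
  if l = [] then [] else l.take 3 :: pvChunks3 (l.drop 3)
termination_by l.length
decreasing_by
  have hl : l ≠ [] := by assumption
  have := List.length_pos_iff.mpr hl
  simp; omega

theorem pvBtn_eq : pvBtnA = pvBtnB := rfl

theorem chunkIt_eq (seq : List (List (String × String))) (last : Nat) :
    pvChunkIt seq last = pvChunks3 (seq.drop last) := by
  rw [pvChunkIt]
  split
  · rename_i h
    have hne : seq.drop last ≠ [] := by
      simp only [ne_eq, List.drop_eq_nil_iff]; omega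
    rw [pvChunks3]
    simp only [hne, ite_false]
    congr 1
    · rw [show ((last : Int) + 3) = ((last : Int) + ((3 : Nat) : Int)) by norm_num,
        PySem.List.slice_natCast_add]
    · rw [chunkIt_eq seq (last + 3)]
      congr 1
      rw [List.drop_drop]
  · rename_i h
    have : seq.drop last = [] := List.drop_eq_nil_iff.mpr (by omega)
    rw [this, pvChunks3]
    simp
termination_by seq.length - last
decreasing_by omega

theorem foldl_map_eq (data : List (List (List (String × String)))) (acc : List (List (List (String × List (String × String))))) :
    data.foldl (fun result row => result ++ [row.map pvBtnA]) acc
      = acc ++ data.map (List.map pvBtnA) := by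
  induction data generalizing acc with
  | nil => simp
  | cons r t ih => simp [List.foldl, ih]

theorem chunks3_map {α β : Type} (f : α → β) (l : List α) :
    (pvChunks3 l).map (List.map f) = pvChunks3 (l.map f) := by
  rw [pvChunks3]
  conv_rhs => rw [pvChunks3]
  by_cases h : l = []
  · simp [h]
  · have h2 : l.map f ≠ [] := by simp [h]
    have := chunks3_map f (l.drop 3)
    simp [h, h2, List.map_take, List.map_drop, this]
termination_by l.length
decreasing_by
  have := List.length_pos_iff.mpr h
  simp; omega

theorem alt_loop' (l : List (List (String × String)))
    (res : List (List (List (String × List (String × String)))))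
    (cur : List (List (String × List (String × String)))) (hcur : cur.length < 3) :
    (let st := l.foldl
        (fun (st : List (List (List (String × List (String × String)))) ×
                   List (List (String × List (String × String)))) b =>
          let current := st.2 ++ [pvBtnB b]
          if current.length == 3 then (st.1 ++ [current], []) else (st.1, current))
        (res, cur);
      if st.2.isEmpty then st.1 else st.1 ++ [st.2])
      = res ++ (if cur = [] ∧ l = [] then [] else pvChunks3 (cur ++ l.map pvBtnB)) := by
  induction l generalizing res cur with
  | nil =>
    by_cases hc : cur = []
    · simp [hc]
    · simp only [List.foldl_nil, List.map_nil, List.append_nil, hc,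
        List.isEmpty_iff, ite_false, and_false, false_and]
      rw [pvChunks3, if_neg hc,
        List.take_of_length_le (by omega), List.drop_eq_nil_of_le (by omega), pvChunks3]
      simp
  | cons b t ih =>
    simp only [List.foldl_cons, List.map_cons]
    by_cases h3 : (cur ++ [pvBtnB b]).length = 3
    · simp only [h3, beq_self_eq_true, ite_true]
      rw [ih (res ++ [cur ++ [pvBtnB b]]) [] (by simp)]
      by_cases ht : t = []
      · subst ht
        simp only [List.map_nil, List.nil_append, and_true, ite_true, List.append_nil]
        rw [if_neg (by simp), pvChunks3, if_neg (by simp),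
          List.take_of_length_le (le_of_eq (by simpa using h3)),
          List.drop_eq_nil_of_le (le_of_eq (by simpa using h3)), pvChunks3]
        simp
      · simp only [List.nil_append, ht, and_false, ite_false, true_and]
        rw [if_neg (show ¬(cur = [] ∧ b :: t = []) by simp), List.append_assoc]
        congr 1
        conv_rhs =>
          rw [show cur ++ pvBtnB b :: t.map pvBtnB = (cur ++ [pvBtnB b]) ++ t.map pvBtnB by simp,
            pvChunks3]
        rw [if_neg (show ¬((cur ++ [pvBtnB b]) ++ t.map pvBtnB = []) by simp),
          List.take_left' h3, List.drop_left' h3]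
        simp
    · have hne2 : cur.length ≠ 2 := by intro hh; apply h3; simp [hh]
      have hb : ((cur ++ [pvBtnB b]).length == 3) = false := by simp; omega
      have hlen : (cur ++ [pvBtnB b]).length < 3 := by simp; omega
      simp only [hb, Bool.false_eq_true, ite_false]
      rw [ih res (cur ++ [pvBtnB b]) hlen, if_neg (by simp), if_neg (by simp)]
      simp

-- ===== VERDICT (by name: the statement is the Claim_ definition above) =====
theorem form_keyboard_buttons_spec : Claim_equal_form_keyboard_buttons := by
  intro buttons _ _
  unfold Spec_form_keyboard_buttons form_keyboard_buttons form_keyboard_buttons_alt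
  rw [alt_loop' buttons [] [] (by simp), chunkIt_eq, foldl_map_eq]
  by_cases hb : buttons = []
  · simp [hb, pvChunks3]
  · simp only [hb, and_false, false_and, ite_false, if_neg, List.nil_append,
      List.drop_zero]
    rw [← chunks3_map, pvBtn_eq]
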